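-- pv_equiv track=rewrite | github.com/mch-sg/dtu-public | 1-semester/02002-programming/psets/w07/arrival_times.py | arrival_times
-- ===== SOURCE A (Python) =====
-- def arrival_times(schedule, delay):
--     nstr = []
--     arr = []
--
--     for j in range(len(schedule)):  #  Split dit schedule array op i tal timer og minutter for hver
--         nstr += schedule[j].split(":")
--
--     for i in range(len(schedule)):  #  Loop igennem længden af skemaet
--         hh = int(nstr[2*i])  #  Sæt timer som værende alle de lige tal i mit array 'nstr' (2k)
--         mm = int(nstr[2*i+1])  #  Sæt minutter som værende alle ulige tal i mit array 'nstr' (2k+1)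
--         mm_delay = mm + delay  #  Antal minutter forsinket
--
--         ntimes = mm_delay // 60  #  Hvor mange gange antal minutter forsinket går op i 60, i.e. hvor mange timer der skal sættes frem
--         hh += ntimes  #  Antal timer der sættes frem
--         mm_delay = mm_delay % 60  #  Resten af minutterne når de er forsinket skal være minutterne
--
--         hh = hh % 24
--
--         arr.append(f"{hh:02}:{mm_delay:02}")
--
--     return arr
-- ===== SOURCE B (Python) =====
-- def arrival_times(schedule, delay):
--     # Precompute all 1440 formatted minute-of-day strings once; each entry is
--     # then just a modular index into this table.
--     table = [f"{t // 60:02}:{t % 60:02}" for t in range(1440)]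
--     out = []
--     for entry in schedule:
--         hh, mm = entry.split(":")
--         out.append(table[(int(hh) * 60 + int(mm) + delay) % 1440])
--     return out
-- ===== Notes on version B (the rewrite author's own statement) =====
-- stated objective: alternative
-- what changed: B precomputes a 1440-entry table of all formatted minute-of-day strings and answers each entry by a modular index (hh*60+mm+delay) % 1440 into it, instead of A's flatten-all-splits list, 2i/2i+1 indexing and per-entry carry arithmetic plus per-entry formatting.
-- outside the precondition, e.g. on arrival_times(['1:2:3'], 0): A returns ['01:02'], B raises ValueError
import Mathlib
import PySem

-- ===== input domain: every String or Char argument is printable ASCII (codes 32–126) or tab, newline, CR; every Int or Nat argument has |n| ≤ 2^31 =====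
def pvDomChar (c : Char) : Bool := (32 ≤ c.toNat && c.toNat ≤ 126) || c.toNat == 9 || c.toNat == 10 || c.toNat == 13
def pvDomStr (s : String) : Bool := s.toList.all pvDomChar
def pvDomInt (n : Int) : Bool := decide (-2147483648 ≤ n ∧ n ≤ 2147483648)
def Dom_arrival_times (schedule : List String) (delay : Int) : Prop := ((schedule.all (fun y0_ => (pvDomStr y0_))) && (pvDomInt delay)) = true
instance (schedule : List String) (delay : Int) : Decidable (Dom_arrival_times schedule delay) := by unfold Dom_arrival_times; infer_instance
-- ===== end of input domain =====

-- B replaces A's flatten-then-2i/2i+1-index scheme and per-entry carry arithmetic/formatting with a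
-- precomputed 1440-entry table of formatted minute-of-day strings indexed by (hh*60+mm+delay) % 1440
-- (objective: alternative).

-- ===== PORT A =====
-- f"{hh:02}:{mm_delay:02}"
def pvFmt (h m : Int) : String :=
  PySem.Str.join ":" [PySem.Str.zfill (PySem.Int.toStr h) 2, PySem.Str.zfill (PySem.Int.toStr m) 2]

def arrival_times (schedule : List String) (delay : Int) : List String :=
  -- nstr = []; for j in range(len(schedule)): nstr += schedule[j].split(":")
  let nstr := (PySem.List.pyRange 0 (schedule.length : Int) 1).foldl
      (fun acc j => acc ++ (PySem.Str.split? (PySem.List.pyGetD schedule j "") ":").getD []) []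
  -- for i in range(len(schedule)): …; arr.append(f"{hh:02}:{mm_delay:02}")
  (PySem.List.pyRange 0 (schedule.length : Int) 1).foldl
      (fun arr i =>
        -- int() on nstr[2i]/nstr[2i+1]: IndexError/ValueError → default, excluded by Pre_
        let hh := (PySem.Int.ofStr? (PySem.List.pyGetD nstr (2*i) "")).getD 0
        let mm := (PySem.Int.ofStr? (PySem.List.pyGetD nstr (2*i+1) "")).getD 0
        let mm_delay := mm + delay
        let ntimes := PySem.Int.floordiv mm_delay 60
        let hh := hh + ntimes
        let mm_delay := PySem.Int.mod mm_delay 60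
        let hh := PySem.Int.mod hh 24
        arr ++ [pvFmt hh mm_delay]) []

-- ===== PORT B =====
-- f"{t // 60:02}:{t % 60:02}" (B's own copy of the format helper; ports share nothing)
def pvFmtB (h m : Int) : String :=
  PySem.Str.join ":" [PySem.Str.zfill (PySem.Int.toStr h) 2, PySem.Str.zfill (PySem.Int.toStr m) 2]

-- table = [f"{t // 60:02}:{t % 60:02}" for t in range(1440)]
def pvTable : List String :=
  (PySem.List.pyRange 0 1440 1).map (fun t => pvFmtB (PySem.Int.floordiv t 60) (PySem.Int.mod t 60))

def arrival_times_alt (schedule : List String) (delay : Int) : List String :=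
  -- out = []; for entry in schedule: hh, mm = entry.split(":"); out.append(table[...])
  schedule.foldl
    (fun out entry =>
      match (PySem.Str.split? entry ":").getD [] with
      | [hs, ms] =>
          out ++ [PySem.List.pyGetD pvTable
            (PySem.Int.mod ((PySem.Int.ofStr? hs).getD 0 * 60 + (PySem.Int.ofStr? ms).getD 0 + delay) 1440) ""]
      | _ => out ++ [""]   -- 'hh, mm = entry.split(":")' raises ValueError in Python; excluded by Pre_
    ) []

-- ===== PRECONDITION & SPEC =====
def pvGoodEntry (s : String) : Bool :=
  let parts := (PySem.Str.split? s ":").getD []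
  parts.length == 2 && parts.all (fun t => (PySem.Int.ofStr? t).isSome)

-- Pre_ excludes malformed schedules: an entry not of the form "<int>:<int>" makes B's per-entry
-- unpack/int() raise ValueError, while A either raises too or silently misaligns its flat 2i/2i+1
-- indexing across entries and returns an accidental pairing.
def Pre_arrival_times (schedule : List String) (delay : Int) : Prop :=
  schedule.all pvGoodEntry = true
instance (schedule : List String) (delay : Int) : Decidable (Pre_arrival_times schedule delay) := by
  unfold Pre_arrival_times; infer_instance

def pvWitness_arrival_times : List String × Int := (["12:34", "23:59"], -100)

def Spec_arrival_times (schedule : List String) (delay : Int) (out : List String) : Prop := out = arrival_times_alt schedule delay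
instance (schedule : List String) (delay : Int) (out : List String) : Decidable (Spec_arrival_times schedule delay out) := by unfold Spec_arrival_times; infer_instance

-- ===== CLAIM (what is proved, stated in full; the proofs are below) =====
def Claim_equal_arrival_times : Prop := ∀ (schedule : List String) (delay : Int), Dom_arrival_times schedule delay → Pre_arrival_times schedule delay → Spec_arrival_times schedule delay (arrival_times schedule delay)

-- ===== LEMMAS AND PROOFS =====

-- abbreviation used only in the proofs: what one pass of A's first loop contributes
def pvSplit (s : String) : List String := (PySem.Str.split? s ":").getD []

-- under Pre_, getting element 2k / 2k+1 of the flattened split list is getting part 0 / 1 of entry k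
theorem pvFlat_getD (l : List String) (hl : ∀ s ∈ l, (pvSplit s).length = 2)
    (k : Nat) (hk : k < l.length) :
    (l.flatMap pvSplit).getD (2*k) "" = (pvSplit (l.getD k "")).getD 0 ""
    ∧ (l.flatMap pvSplit).getD (2*k+1) "" = (pvSplit (l.getD k "")).getD 1 "" := by
  induction l generalizing k with
  | nil => simp at hk
  | cons s rest ih =>
    have hs : (pvSplit s).length = 2 := hl s (List.mem_cons_self)
    match k with
    | 0 =>
      simp only [List.flatMap_cons, Nat.mul_zero, List.getD]
      constructor <;>
        · rw [List.getElem?_append_left (by omega)]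
          simp
    | k+1 =>
      have hrest := ih (fun t ht => hl t (List.mem_cons_of_mem _ ht)) k (by simpa using hk)
      have h1 : 2*(k+1) = (pvSplit s).length + 2*k := by omega
      have h3 : (pvSplit s).length + 2*k - (pvSplit s).length = 2*k := by omega
      have h4 : (pvSplit s).length + 2*k + 1 - (pvSplit s).length = 2*k+1 := by omega
      simp only [List.flatMap_cons, List.getD_eq_getElem?_getD] at *
      rw [h1, List.getElem?_append_right (by omega), List.getElem?_append_right (by omega), h3, h4]
      simpa using hrest

-- indexing a map over pyRange 0 n 1 at an in-range i yields f i
-- the two format helpers are definitionally the same function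
theorem pvFmtB_eq : pvFmtB = pvFmt := rfl

theorem pvRangeMap_getD (n : Nat) (f : Int → String) (i : Int) (h0 : 0 ≤ i) (h1 : i < n) :
    PySem.List.pyGetD ((PySem.List.pyRange 0 (n : Int) 1).map f) i "" = f i := by
  rw [PySem.List.pyRange_zero_natCast, List.map_map, show i = ((i.toNat : Nat) : Int) by omega,
      PySem.List.pyGetD_natCast]
  have hlt : i.toNat < n := by omega
  rw [List.getD_eq_getElem?_getD, List.getElem?_eq_getElem (by simpa using hlt)]
  simp

-- the table answers any in-range minute-of-day index by formatting it
theorem pvTable_getD (i : Int) (h0 : 0 ≤ i) (h1 : i < 1440) :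
    PySem.List.pyGetD pvTable i "" = pvFmt (PySem.Int.floordiv i 60) (PySem.Int.mod i 60) := by
  unfold pvTable
  rw [pvFmtB_eq]
  rw [show (1440 : Int) = ((1440 : Nat) : Int) by norm_num]
  exact pvRangeMap_getD 1440 _ i h0 (by omega)

theorem arrival_times_spec : Claim_equal_arrival_times := by
  intro schedule delay _hDom hPre
  unfold Spec_arrival_times arrival_times arrival_times_alt
  have hgood : ∀ s ∈ schedule, pvGoodEntry s = true := by
    intro s hs
    exact List.all_eq_true.mp hPre s hs
  have hlen : ∀ s ∈ schedule, (pvSplit s).length = 2 := by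
    intro s hs
    have := hgood s hs
    unfold pvGoodEntry at this
    simp only [Bool.and_eq_true, beq_iff_eq] at this
    exact this.1
  -- A's first loop: nstr = flatMap of the per-entry splits
  rw [PySem.List.foldl_append_eq_flatMap
        (fun j => (PySem.Str.split? (PySem.List.pyGetD schedule j "") ":").getD [])]
  have hx : List.map (fun j => PySem.List.pyGetD schedule j "")
      (PySem.List.pyRange 0 ((schedule.length : Int)) 1) = schedule := by
    simpa [PySem.List.len] using PySem.List.map_pyGetD_pyRange_zero schedule ""
  have hnstr : List.flatMap (fun j => (PySem.Str.split? (PySem.List.pyGetD schedule j "") ":").getD [])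
      (PySem.List.pyRange 0 ((schedule.length : Int)) 1) = schedule.flatMap pvSplit := by
    conv_rhs => rw [← hx]
    rw [List.flatMap_map]; rfl
  simp only [List.nil_append]
  rw [hnstr]
  -- both loops become maps
  rw [PySem.List.foldl_append_singleton_eq_map]
  have hbody : (fun (out : List String) entry =>
      match (PySem.Str.split? entry ":").getD [] with
      | [hs, ms] =>
          out ++ [PySem.List.pyGetD pvTable
            (PySem.Int.mod ((PySem.Int.ofStr? hs).getD 0 * 60 + (PySem.Int.ofStr? ms).getD 0 + delay) 1440) ""]
      | _ => out ++ [""])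
      = fun (out : List String) entry => out ++
        [match (PySem.Str.split? entry ":").getD [] with
         | [hs, ms] =>
             PySem.List.pyGetD pvTable
               (PySem.Int.mod ((PySem.Int.ofStr? hs).getD 0 * 60 + (PySem.Int.ofStr? ms).getD 0 + delay) 1440) ""
         | _ => ""] := by
    funext out entry
    rcases hsp : (PySem.Str.split? entry ":").getD [] with _ | ⟨a, _ | ⟨b, _ | ⟨c, t⟩⟩⟩ <;> simp
  rw [hbody, PySem.List.foldl_append_singleton_eq_map]
  simp only [List.nil_append]
  -- compare elementwise
  rw [PySem.List.pyRange_zero_natCast, List.map_map]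
  apply List.ext_getElem (by simp)
  intro k hk hk'
  simp only [List.getElem_map, List.getElem_range, Function.comp]
  have hkl : k < schedule.length := by simpa using hk
  have hflat := pvFlat_getD schedule hlen k hkl
  have hsk : schedule.getD k "" = schedule[k] := by
    simp [List.getD_eq_getElem?_getD, List.getElem?_eq_getElem hkl]
  rw [hsk] at hflat
  have hg := hgood schedule[k] (List.getElem_mem hkl)
  unfold pvGoodEntry at hg
  simp only at hg
  have h2 : (pvSplit schedule[k]).length = 2 := hlen _ (List.getElem_mem hkl)
  obtain ⟨a, b, hab⟩ : ∃ a b, pvSplit schedule[k] = [a, b] := by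
    cases h : pvSplit schedule[k] with
    | nil => rw [h] at h2; simp at h2
    | cons x t =>
      cases t with
      | nil => rw [h] at h2; simp at h2
      | cons y u =>
        cases u with
        | nil => exact ⟨x, y, rfl⟩
        | cons z v => rw [h] at h2; simp at h2
  rw [hab] at hflat
  have hsplit : (PySem.Str.split? schedule[k] ":").getD [] = [a, b] := hab
  rw [hsplit] at hg
  simp only [List.all_cons, List.all_nil, Bool.and_true, Bool.and_eq_true] at hg
  obtain ⟨ha, hb⟩ := hg.2
  obtain ⟨hv, hav⟩ := Option.isSome_iff_exists.mp ha
  obtain ⟨mv, hbv⟩ := Option.isSome_iff_exists.mp hb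
  have e1 : PySem.List.pyGetD (schedule.flatMap pvSplit) (2 * (k : Int)) "" = a := by
    have : (2 : Int) * (k : Int) = ((2*k : Nat) : Int) := by push_cast; ring
    rw [this, PySem.List.pyGetD_natCast, hflat.1]; simp
  have e2 : PySem.List.pyGetD (schedule.flatMap pvSplit) (2 * (k : Int) + 1) "" = b := by
    have : (2 : Int) * (k : Int) + 1 = ((2*k+1 : Nat) : Int) := by push_cast; ring
    rw [this, PySem.List.pyGetD_natCast, hflat.2]; simp
  rw [e1, e2, hsplit]
  simp only [hav, hbv, Option.getD_some]
  -- B's table lookup equals A's per-entry carry arithmetic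
  set T := hv * 60 + mv + delay with hT
  have hmod : PySem.Int.mod T 1440 = T % 1440 := PySem.Int.mod_eq_emod_of_pos (by norm_num)
  have h0 : 0 ≤ T % 1440 := Int.emod_nonneg T (by norm_num)
  have h1 : T % 1440 < 1440 := Int.emod_lt_of_pos T (by norm_num)
  rw [hmod, pvTable_getD _ h0 h1]
  rw [PySem.Int.floordiv_eq_ediv_of_pos (by norm_num),
      PySem.Int.mod_eq_emod_of_pos (by norm_num),
      PySem.Int.floordiv_eq_ediv_of_pos (by norm_num),
      PySem.Int.mod_eq_emod_of_pos (by norm_num),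
      PySem.Int.mod_eq_emod_of_pos (by norm_num)]
  have hh' : (hv + (mv + delay) / 60) % 24 = (T % 1440) / 60 := by omega
  have hm' : (mv + delay) % 60 = (T % 1440) % 60 := by omega
  rw [hh', hm']
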